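-- pv_equiv track=rewrite | github.com/pypi-data/pypi-mirror-402 | packages/vgrid/vgrid-1.4.10-py3-none-any.whl/vgrid/dggs/qtm.py | qtm_children
-- ===== SOURCE A (Python) =====
-- def qtm_children(qtm_id, resolution=None):
--     if resolution is None:
--         resolution = len(qtm_id) + 1  # Default to next level
--
--     children = []
--
--     def recurse(current_id, current_resolution):
--         if current_resolution == resolution:
--             children.append(current_id)
--             return
--         for i in range(4):  # Subdivide into 4 sub-triangles
--             recurse(current_id + str(i), current_resolution + 1)
--
--     recurse(qtm_id, len(qtm_id))
--     return children
-- ===== SOURCE B (Python) =====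
-- def qtm_children(qtm_id, resolution=None):
--     if resolution is None:
--         resolution = len(qtm_id) + 1  # Default to next level
--     result = [qtm_id]
--     for _ in range(resolution - len(qtm_id)):
--         result = [c + str(i) for c in result for i in range(4)]
--     return result
-- ===== Notes on version B (the rewrite author's own statement) =====
-- stated objective: simpler
-- what changed: Replaces the depth-first recursion with closure-appended accumulator by an iterative breadth-first level expansion: the frontier list is rebuilt depth times with a comprehension, producing the same lexicographic order.
import Mathlib
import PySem

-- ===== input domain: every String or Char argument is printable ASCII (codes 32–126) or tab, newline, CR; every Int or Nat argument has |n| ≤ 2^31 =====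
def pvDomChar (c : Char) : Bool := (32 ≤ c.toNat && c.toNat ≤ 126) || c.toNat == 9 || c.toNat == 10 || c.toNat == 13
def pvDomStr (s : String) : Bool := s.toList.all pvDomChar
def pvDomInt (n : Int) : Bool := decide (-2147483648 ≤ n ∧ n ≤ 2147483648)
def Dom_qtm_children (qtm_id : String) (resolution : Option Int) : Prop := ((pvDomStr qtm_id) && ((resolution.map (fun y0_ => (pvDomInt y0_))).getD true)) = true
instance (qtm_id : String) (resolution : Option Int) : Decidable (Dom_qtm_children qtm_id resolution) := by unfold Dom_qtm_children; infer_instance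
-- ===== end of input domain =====

-- B replaces A's depth-first recursion by an iterative breadth-first level expansion (same order, same cost).


-- ===== PORT A =====
-- recurse(current_id, current_resolution): appends current_id when current_resolution == resolution,
-- else recurses on the four children in order. The final 'else []' branch is a totality guard only:
-- it is reached exactly where Python diverges (RecursionError), excluded by Pre_.
def qtmRecurse (res : Int) (cur : String) (curRes : Int) : List String :=
  if curRes = res then [cur]
  else if _h : curRes < res then
    (PySem.List.pyRange 0 4 1).foldl
      (fun acc i => acc ++ qtmRecurse res (cur ++ PySem.Int.toStr i) (curRes + 1)) []
  else []
termination_by (res - curRes).toNat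
decreasing_by omega

def qtm_children (qtm_id : String) (resolution : Option Int) : List String :=
  let res := resolution.getD (PySem.Str.len qtm_id + 1)
  qtmRecurse res qtm_id (PySem.Str.len qtm_id)

-- ===== PORT B =====
def qtm_children_alt (qtm_id : String) (resolution : Option Int) : List String :=
  let res := resolution.getD (PySem.Str.len qtm_id + 1)
  (PySem.List.pyRange 0 (res - PySem.Str.len qtm_id) 1).foldl
    (fun result _ =>
      result.flatMap (fun c => (PySem.List.pyRange 0 4 1).map (fun i => c ++ PySem.Int.toStr i)))
    [qtm_id]

-- ===== PRECONDITION & SPEC =====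
-- Pre_ excludes resolution values strictly below len(qtm_id), on which Python A raises RecursionError.
def Pre_qtm_children (qtm_id : String) (resolution : Option Int) : Prop :=
  PySem.Str.len qtm_id ≤ resolution.getD (PySem.Str.len qtm_id)
instance (qtm_id : String) (resolution : Option Int) : Decidable (Pre_qtm_children qtm_id resolution) := by unfold Pre_qtm_children; infer_instance

def pvWitness_qtm_children : String × Option Int := ("0", some 2)

def Spec_qtm_children (qtm_id : String) (resolution : Option Int) (out : List String) : Prop := out = qtm_children_alt qtm_id resolution
instance (qtm_id : String) (resolution : Option Int) (out : List String) : Decidable (Spec_qtm_children qtm_id resolution out) := by unfold Spec_qtm_children; infer_instance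

-- ===== CLAIM (what is proved, stated in full; the proofs are below) =====
def Claim_equal_qtm_children : Prop := ∀ (qtm_id : String) (resolution : Option Int), Dom_qtm_children qtm_id resolution → Pre_qtm_children qtm_id resolution → Spec_qtm_children qtm_id resolution (qtm_children qtm_id resolution)
-- ===== LEMMAS AND PROOFS =====

-- one breadth-first step: expand every id of the frontier by its four children
def qtmStep (l : List String) : List String :=
  l.flatMap (fun c => (PySem.List.pyRange 0 4 1).map (fun i => c ++ PySem.Int.toStr i))

-- B's loop, as iterated steps
def qtmLevels (d : Nat) (init : List String) : List String :=
  match d with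
  | 0 => init
  | d + 1 => qtmLevels d (qtmStep init)

theorem qtmLevels_append (d : Nat) (l1 l2 : List String) :
    qtmLevels d (l1 ++ l2) = qtmLevels d l1 ++ qtmLevels d l2 := by
  induction d generalizing l1 l2 with
  | zero => rfl
  | succ d ih => simp [qtmLevels, qtmStep, List.flatMap_append, ih]

theorem qtmLevels_nil (d : Nat) : qtmLevels d [] = [] := by
  induction d with
  | zero => rfl
  | succ d ih => simpa [qtmLevels, qtmStep] using ih

theorem qtmLevels_map (d : Nat) (f : Int → String) (l : List Int) :
    qtmLevels d (l.map f) = l.flatMap (fun i => qtmLevels d [f i]) := by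
  induction l with
  | nil => simp [qtmLevels_nil]
  | cons a t ih =>
    simp only [List.map_cons, List.flatMap_cons, ← ih]
    rw [show (f a :: t.map f) = [f a] ++ t.map f from rfl, qtmLevels_append]

theorem foldl_range_eq_qtmLevels (n : Int) (init : List String) :
    (PySem.List.pyRange 0 n 1).foldl (fun result _ => qtmStep result) init
      = qtmLevels n.toNat init := by
  rw [PySem.List.pyRange_one, Int.sub_zero, List.foldl_map]
  generalize n.toNat = d
  induction d generalizing init with
  | zero => rfl
  | succ d ih =>
    rw [List.range_succ_eq_map]
    simp only [List.foldl_cons, List.foldl_map]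
    exact ih (qtmStep init)

theorem qtmRecurse_eq (d : Nat) (res curRes : Int) (cur : String)
    (h : curRes + d = res) :
    qtmRecurse res cur curRes = qtmLevels d [cur] := by
  induction d generalizing cur curRes with
  | zero =>
    rw [qtmRecurse]
    simp only [Nat.cast_zero, add_zero] at h
    simp [h, qtmLevels]
  | succ d ih =>
    rw [qtmRecurse]
    have hne : curRes ≠ res := by omega
    have hlt : curRes < res := by omega
    simp only [hne, if_false, hlt, dif_pos]
    have hstep : ∀ i : Int,
        qtmRecurse res (cur ++ PySem.Int.toStr i) (curRes + 1) =
          qtmLevels d [cur ++ PySem.Int.toStr i] := by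
      intro i; exact ih _ _ (by push_cast at h ⊢; omega)
    calc (PySem.List.pyRange 0 4 1).foldl
          (fun acc i => acc ++ qtmRecurse res (cur ++ PySem.Int.toStr i) (curRes + 1)) []
        = (PySem.List.pyRange 0 4 1).flatMap
            (fun i => qtmRecurse res (cur ++ PySem.Int.toStr i) (curRes + 1)) := by
          rw [PySem.List.foldl_append_eq_flatMap, List.nil_append]
      _ = (PySem.List.pyRange 0 4 1).flatMap
            (fun i => qtmLevels d [cur ++ PySem.Int.toStr i]) := by
          simp only [hstep]
      _ = qtmLevels d (qtmStep [cur]) := by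
          simp only [qtmStep, List.flatMap_cons, List.flatMap_nil, List.append_nil]
          rw [qtmLevels_map]
      _ = qtmLevels (d + 1) [cur] := rfl

-- ===== VERDICT (by name: the statement is the Claim_ definition above) =====
theorem qtm_children_spec : Claim_equal_qtm_children := by
  intro qtm_id resolution _hdom hpre
  unfold Spec_qtm_children qtm_children qtm_children_alt
  have hle : PySem.Str.len qtm_id ≤ resolution.getD (PySem.Str.len qtm_id + 1) := by
    cases resolution with
    | none => simp
    | some r => simpa [Pre_qtm_children] using hpre
  rw [show (PySem.List.pyRange 0 (resolution.getD (PySem.Str.len qtm_id + 1) - PySem.Str.len qtm_id) 1).foldl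
        (fun result _ => result.flatMap
          (fun c => (PySem.List.pyRange 0 4 1).map (fun i => c ++ PySem.Int.toStr i))) [qtm_id]
      = qtmLevels (resolution.getD (PySem.Str.len qtm_id + 1) - PySem.Str.len qtm_id).toNat [qtm_id]
      from foldl_range_eq_qtmLevels _ _]
  exact qtmRecurse_eq _ _ _ _ (by omega)
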